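-- pv_equiv track=rewrite | github.com/N777W/EMSE-Snake_Case-CamelCase-Exp | check_pair.py | get_word_pair_length_camel_case
-- ===== SOURCE A (Python) =====
-- def get_word_pair_length_camel_case(word_pair):
--     """gets word pair length for CamelCase"""
--     words = []
--     current_word = ""
--     for char in word_pair:
--         if char.isupper() and current_word:
--             words.append(current_word)
--             current_word = char
--         else:
--             current_word += char
--     if current_word:
--         words.append(current_word)
--     return len(words)
-- ===== SOURCE B (Python) =====
-- def get_word_pair_length_camel_case(word_pair):
--     """gets word pair length for CamelCase"""
--     count = 0
--     seen = False
--     for char in word_pair: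
--         if seen and char.isupper():
--             count += 1
--         seen = True
--     return count + 1 if seen else count
-- ===== Notes on version B (the rewrite author's own statement) =====
-- stated objective: simpler
-- what changed: B counts word boundaries directly (one uppercase char after the first char seen = one boundary, plus one word if non-empty) instead of building a list of word strings and a current-word buffer.
import Mathlib
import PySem

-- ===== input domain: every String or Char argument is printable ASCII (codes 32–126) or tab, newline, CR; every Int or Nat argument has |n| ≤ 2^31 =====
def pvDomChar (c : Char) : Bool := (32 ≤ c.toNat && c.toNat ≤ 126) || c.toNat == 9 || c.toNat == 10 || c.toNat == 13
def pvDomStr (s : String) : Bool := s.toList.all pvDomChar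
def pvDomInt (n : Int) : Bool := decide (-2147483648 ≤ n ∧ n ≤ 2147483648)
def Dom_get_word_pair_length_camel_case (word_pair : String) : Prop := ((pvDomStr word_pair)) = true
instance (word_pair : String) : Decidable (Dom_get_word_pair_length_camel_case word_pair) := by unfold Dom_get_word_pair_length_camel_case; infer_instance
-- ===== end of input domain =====

-- B counts word boundaries with a counter and a seen-flag instead of building a list of
-- word strings and a current-word buffer (objective: simpler, O(1) extra space).


-- ===== PORT A =====
-- loop body of A: flush current_word on an uppercase char, else extend it
def pvStepA (st : List (List Char) × List Char) (char : Char) : List (List Char) × List Char :=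
  if PySem.Chars.isupper char = true ∧ st.2 ≠ [] then (st.1 ++ [st.2], [char])
  else (st.1, st.2 ++ [char])

def get_word_pair_length_camel_case (word_pair : String) : Int :=
  let st := word_pair.toList.foldl pvStepA ([], [])
  let words := if st.2 ≠ [] then st.1 ++ [st.2] else st.1
  (words.length : Int)

-- ===== PORT B =====
-- loop body of B: bump the counter on an uppercase char once something was seen
def pvStepB (st : Int × Bool) (char : Char) : Int × Bool :=
  ((if st.2 = true ∧ PySem.Chars.isupper char = true then st.1 + 1 else st.1), true)

def get_word_pair_length_camel_case_alt (word_pair : String) : Int :=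
  let st := word_pair.toList.foldl pvStepB (0, false)
  if st.2 = true then st.1 + 1 else st.1

-- ===== PRECONDITION & SPEC =====
def Spec_get_word_pair_length_camel_case (word_pair : String) (out : Int) : Prop := out = get_word_pair_length_camel_case_alt word_pair
instance (word_pair : String) (out : Int) : Decidable (Spec_get_word_pair_length_camel_case word_pair out) := by unfold Spec_get_word_pair_length_camel_case; infer_instance

-- ===== CLAIM (what is proved, stated in full; the proofs are below) =====
def Claim_equal_get_word_pair_length_camel_case : Prop := ∀ (word_pair : String), Dom_get_word_pair_length_camel_case word_pair → Spec_get_word_pair_length_camel_case word_pair (get_word_pair_length_camel_case word_pair)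

-- ===== LEMMAS AND PROOFS =====

-- A's loop from a non-empty current word: final word count = words so far + 1 + uppercase chars remaining
theorem pvA_inv (l : List Char) (ws : List (List Char)) (cur : List Char) (h : cur ≠ []) :
    (let st := l.foldl pvStepA (ws, cur)
     (if st.2 ≠ [] then st.1 ++ [st.2] else st.1).length)
    = ws.length + 1 + l.countP (fun c => PySem.Chars.isupper c) := by
  induction l generalizing ws cur with
  | nil => simp [h]
  | cons c l ih =>
    simp only [List.foldl_cons, List.countP_cons]
    by_cases hu : PySem.Chars.isupper c = true
    · rw [show pvStepA (ws, cur) c = (ws ++ [cur], [c]) from by simp [pvStepA, hu, h],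
        ih (ws ++ [cur]) [c] (by simp)]
      simp [hu]; omega
    · rw [show pvStepA (ws, cur) c = (ws, cur ++ [c]) from by simp [pvStepA, hu],
        ih ws (cur ++ [c]) (by simp)]
      simp [hu]

-- B's loop with the seen-flag set: the flag stays set and the counter adds the uppercase count
theorem pvB_inv (l : List Char) (count : Int) :
    l.foldl pvStepB (count, true)
    = (count + l.countP (fun c => PySem.Chars.isupper c), true) := by
  induction l generalizing count with
  | nil => simp
  | cons c l ih =>
    simp only [List.foldl_cons, List.countP_cons]
    by_cases hu : PySem.Chars.isupper c = true
    · rw [show pvStepB (count, true) c = (count + 1, true) from by simp [pvStepB, hu], ih]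
      simp [hu]; ring
    · rw [show pvStepB (count, true) c = (count, true) from by simp [pvStepB, hu], ih]
      simp [hu]

-- ===== VERDICT (by name: the statement is the Claim_ definition above) =====
theorem get_word_pair_length_camel_case_spec : Claim_equal_get_word_pair_length_camel_case := by
  intro s _
  unfold Spec_get_word_pair_length_camel_case get_word_pair_length_camel_case
    get_word_pair_length_camel_case_alt
  cases hs : s.toList with
  | nil => simp
  | cons c l =>
    simp only [List.foldl_cons]
    rw [show pvStepA ([], []) c = ([], [c]) from by simp [pvStepA],
      show pvStepB (0, false) c = (0, true) from by simp [pvStepB]]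
    have hA := pvA_inv l [] [c] (by simp)
    simp only [List.length_nil] at hA
    rw [pvB_inv]
    simp only [hA]
    simp
    ring
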